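-- pv_equiv track=rewrite | github.com/moaazsalama/ir_project | new.py | build_positional_index
-- ===== SOURCE A (Python) =====
-- def build_positional_index(documents):
--     """Build a positional index from a list of documents."""
--     positional_index = {}
--     document_number = 1
--
--     for document in documents:
--         for positional, term in enumerate(document):
--             if term in positional_index:
--                 positional_index[term][0] += 1
--
--                 if document_number in positional_index[term][1]:
--                     positional_index[term][1][document_number].append(positional)
--                 else:
--                     positional_index[term][1][document_number] = [positional]
--             else:
--                 positional_index[term] = [1, {document_number: [positional]}]
--
--         document_number += 1
--
--     return positional_index
-- ===== SOURCE B (Python) =====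
-- def build_positional_index(documents):
--     """Build a positional index from a list of documents."""
--     # Flatten everything into one (term, doc_num, position) token stream.
--     tokens = [(term, doc_num, position)
--               for doc_num, document in enumerate(documents, 1)
--               for position, term in enumerate(document)]
--
--     result = {}
--     for term, _, _ in tokens:
--         if term in result:
--             continue
--         # All occurrences of this term, in stream order: doc numbers are
--         # nondecreasing, so equal doc numbers are consecutive runs.
--         occs = [(d, p) for t, d, p in tokens if t == term]
--         runs = []
--         for d, p in occs:
--             if runs and runs[-1][0] == d:
--                 runs[-1][1].append(p)
--             else:
--                 runs.append((d, [p]))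
--         result[term] = [len(occs), dict((d, ps) for d, ps in runs)]
--     return result
-- ===== Notes on version B (the rewrite author's own statement) =====
-- stated objective: alternative
-- what changed: B flattens the documents into one (term, doc, position) token stream, then for each first-seen term filters its occurrences out of the stream and groups them into per-document runs by a run-length scan (equal doc numbers are consecutive in stream order), deriving the count as len(occs) - no nested per-term/per-doc dict is ever built or updated.
import Mathlib
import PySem

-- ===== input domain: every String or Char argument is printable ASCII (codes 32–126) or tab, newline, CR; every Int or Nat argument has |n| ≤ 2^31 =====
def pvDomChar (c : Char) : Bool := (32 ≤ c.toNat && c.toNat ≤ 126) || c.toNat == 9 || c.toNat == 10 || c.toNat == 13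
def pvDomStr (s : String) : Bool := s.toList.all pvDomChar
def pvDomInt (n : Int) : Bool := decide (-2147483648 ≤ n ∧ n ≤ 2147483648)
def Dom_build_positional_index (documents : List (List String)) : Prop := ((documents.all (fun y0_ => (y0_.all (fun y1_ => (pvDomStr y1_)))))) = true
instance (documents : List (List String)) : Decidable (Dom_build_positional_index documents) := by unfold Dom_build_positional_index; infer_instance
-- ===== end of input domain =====

-- B flattens the input into one (term, doc, position) token stream and, per first-seen
-- term, filters its occurrences and groups them by a run-length scan (no nested dicts,
-- count derived as the number of occurrences): a different algorithm, same output.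

-- ===== PORT A =====
def aInner (docnum : Int) (st : PySem.Dict String (Int × PySem.Dict Int (List Int)))
    (p : Int × String) : PySem.Dict String (Int × PySem.Dict Int (List Int)) :=
  match st.get? p.2 with
  | some cv =>
      st.insert p.2 (cv.1 + 1,
        match cv.2.get? docnum with
        | some ps => cv.2.insert docnum (ps ++ [p.1])
        | none => cv.2.insert docnum [p.1])
  | none => st.insert p.2 (1, (PySem.Dict.empty).insert docnum [p.1])

def build_positional_index (documents : List (List String)) :
    List (String × Int × (List (Int × List Int))) :=
  let res := documents.foldl
    (fun (acc : (PySem.Dict String (Int × PySem.Dict Int (List Int))) × Int) document =>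
      ((PySem.List.enumerate document 0).foldl (aInner acc.2) acc.1, acc.2 + 1))
    (PySem.Dict.empty, 1)
  res.1.items.map (fun p => (p.1, p.2.1, p.2.2.items))

-- ===== PORT B =====
-- the flat [(term, doc_num, position)] comprehension
def bTokens (documents : List (List String)) : List (String × Int × Int) :=
  (PySem.List.enumerate documents 1).flatMap
    (fun pr => (PySem.List.enumerate pr.2 0).map (fun q => (q.2, pr.1, q.1)))

-- Python appends/extends at the END of 'runs'; here the list is kept head-first and
-- reversed once at the end (exact).
def bRunStep (acc : List (Int × List Int)) (pr : Int × Int) : List (Int × List Int) :=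
  match acc with
  | (d0, ps) :: rest =>
      if d0 == pr.1 then (d0, ps ++ [pr.2]) :: rest
      else (pr.1, [pr.2]) :: (d0, ps) :: rest
  | [] => [(pr.1, [pr.2])]

-- the loop body under 'if term in result: continue': occs, runs, [len(occs), dict(runs)]
def bValue (tokens : List (String × Int × Int)) (t : String) : Int × List (Int × List Int) :=
  let occs := (tokens.filter (fun x => x.1 == t)).map (fun x => (x.2.1, x.2.2))
  let runs := (occs.foldl bRunStep []).reverse
  ((occs.length : Int),
   (runs.foldl (fun (d : PySem.Dict Int (List Int)) pr => d.insert pr.1 pr.2)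
      PySem.Dict.empty).items)

def build_positional_index_alt (documents : List (List String)) :
    List (String × Int × (List (Int × List Int))) :=
  let tokens := bTokens documents
  (tokens.foldl
    (fun (res : PySem.Dict String (Int × List (Int × List Int))) tk =>
      if res.contains tk.1 then res else res.insert tk.1 (bValue tokens tk.1))
    PySem.Dict.empty).items

-- ===== PRECONDITION & SPEC =====
def Spec_build_positional_index (documents : List (List String)) (out : List (String × Int × (List (Int × List Int)))) : Prop := out = build_positional_index_alt documents
instance (documents : List (List String)) (out : List (String × Int × (List (Int × List Int)))) : Decidable (Spec_build_positional_index documents out) := by unfold Spec_build_positional_index; infer_instance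

-- ===== CLAIM (what is proved, stated in full; the proofs are below) =====
def Claim_equal_build_positional_index : Prop := ∀ (documents : List (List String)), Dom_build_positional_index documents → Spec_build_positional_index documents (build_positional_index documents)

-- ===== LEMMAS AND PROOFS =====

-- A's nested loops as a single fold over the flat token stream
def stepA (st : PySem.Dict String (Int × PySem.Dict Int (List Int)))
    (tk : String × Int × Int) : PySem.Dict String (Int × PySem.Dict Int (List Int)) :=
  aInner tk.2.1 st (tk.2.2, tk.1)

def bTokensFrom (documents : List (List String)) (n : Int) : List (String × Int × Int) :=
  (PySem.List.enumerate documents n).flatMap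
    (fun pr => (PySem.List.enumerate pr.2 0).map (fun q => (q.2, pr.1, q.1)))

def keysOf (ts : List (String × Int × Int)) : List String :=
  ts.foldl (fun acc tk => if tk.1 ∈ acc then acc else acc ++ [tk.1]) []

def occsOf (ts : List (String × Int × Int)) (t : String) : List (Int × Int) :=
  (ts.filter (fun x => x.1 == t)).map (fun x => (x.2.1, x.2.2))

def innerStep (m : PySem.Dict Int (List Int)) (pr : Int × Int) : PySem.Dict Int (List Int) :=
  match m.get? pr.1 with
  | some ps => m.insert pr.1 (ps ++ [pr.2])
  | none => m.insert pr.1 [pr.2]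

def innerFold (occs : List (Int × Int)) : PySem.Dict Int (List Int) :=
  occs.foldl innerStep PySem.Dict.empty

def gA (ts : List (String × Int × Int)) (t : String) : Int × PySem.Dict Int (List Int) :=
  (((ts.filter (fun x => x.1 == t)).length : Int), innerFold (occsOf ts t))

theorem A_fold_flat (docs : List (List String)) (n : Int)
    (st : PySem.Dict String (Int × PySem.Dict Int (List Int))) :
    (docs.foldl
      (fun (acc : (PySem.Dict String (Int × PySem.Dict Int (List Int))) × Int) document =>
        ((PySem.List.enumerate document 0).foldl (aInner acc.2) acc.1, acc.2 + 1))
      (st, n)).1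
    = (bTokensFrom docs n).foldl stepA st := by
  induction docs generalizing n st with
  | nil => simp [bTokensFrom]
  | cons d ds ih =>
      rw [List.foldl_cons]
      rw [ih]
      unfold bTokensFrom
      rw [PySem.List.enumerate_cons, List.flatMap_cons, List.foldl_append, List.foldl_map]
      have hf : (fun (s : PySem.Dict String (Int × PySem.Dict Int (List Int)))
          (q : Int × String) => stepA s (q.2, n, q.1)) = aInner n := by
        funext s q
        simp [stepA, aInner]
      rw [hf]

theorem mem_keysOf_aux (ts : List (String × Int × Int)) (acc : List String) (x : String) :
    x ∈ ts.foldl (fun acc tk => if tk.1 ∈ acc then acc else acc ++ [tk.1]) acc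
      ↔ x ∈ acc ∨ x ∈ ts.map (·.1) := by
  induction ts generalizing acc with
  | nil => simp
  | cons tk ts ih =>
      rw [List.foldl_cons]
      by_cases h : tk.1 ∈ acc
      · rw [if_pos h, ih]
        simp only [List.map_cons, List.mem_cons]
        constructor
        · tauto
        · rintro (h' | he | h')
          · tauto
          · exact Or.inl (he ▸ h)
          · tauto
      · rw [if_neg h, ih]
        simp only [List.mem_append, List.map_cons, List.mem_cons]
        tauto

theorem mem_keysOf (ts : List (String × Int × Int)) (x : String) :
    x ∈ keysOf ts ↔ x ∈ ts.map (·.1) := by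
  unfold keysOf; rw [mem_keysOf_aux]; simp

theorem get?_mk_map {ν : Type} (ks : List String) (g : String → ν) (k : String) :
    (PySem.Dict.mk (ks.map (fun t => (t, g t)))).get? k
      = if k ∈ ks then some (g k) else none := by
  induction ks with
  | nil => simp [PySem.Dict.get?]
  | cons a ks ih =>
      rw [List.map_cons, PySem.Dict.get?_mk_cons, ih]
      by_cases h : a = k
      · subst h; simp
      · simp [h, Ne.symm h, beq_iff_eq]

theorem contains_mk_map {ν : Type} (ks : List String) (g : String → ν) (k : String) :
    (PySem.Dict.mk (ks.map (fun t => (t, g t)))).contains k = decide (k ∈ ks) := by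
  rw [PySem.Dict.contains_eq_decide_mem_keys]
  congr 1
  simp only [PySem.Dict.keys_mk, List.map_map, Function.comp_def, eq_iff_iff]
  simp

theorem insert_mk_map_mem {ν : Type} (ks : List String) (g : String → ν) (k : String)
    (v : ν) (hk : k ∈ ks) :
    (PySem.Dict.mk (ks.map (fun t => (t, g t)))).insert k v
      = PySem.Dict.mk (ks.map (fun t => (t, if t = k then v else g t))) := by
  apply PySem.Dict.ext
  rw [PySem.Dict.items_insert, contains_mk_map]
  simp only [hk, decide_true, if_true]
  show (List.map (fun t => (t, g t)) ks).map _ = _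
  rw [List.map_map]
  apply List.map_congr_left
  intro t _
  by_cases h : t = k
  · subst h; simp
  · simp [h, beq_iff_eq]

theorem insert_mk_map_not_mem {ν : Type} (ks : List String) (g : String → ν) (k : String)
    (v : ν) (hk : k ∉ ks) :
    (PySem.Dict.mk (ks.map (fun t => (t, g t)))).insert k v
      = PySem.Dict.mk (ks.map (fun t => (t, g t)) ++ [(k, v)]) := by
  apply PySem.Dict.ext
  rw [PySem.Dict.items_insert, contains_mk_map]
  simp [hk]

theorem filter_key_nil (ts : List (String × Int × Int)) (t : String)
    (h : t ∉ ts.map (·.1)) : ts.filter (fun x => x.1 == t) = [] := by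
  apply List.filter_eq_nil_iff.mpr
  intro x hx
  simp only [beq_iff_eq]
  intro he
  exact h (he ▸ List.mem_map_of_mem hx)

theorem mainA (ts : List (String × Int × Int)) :
    ts.foldl stepA PySem.Dict.empty
      = PySem.Dict.mk ((keysOf ts).map (fun t => (t, gA ts t))) := by
  induction ts using List.reverseRecOn with
  | nil => rfl
  | append_singleton ts x ih =>
      rw [List.foldl_append, List.foldl_cons, List.foldl_nil, ih]
      have hkeys : keysOf (ts ++ [x])
          = if x.1 ∈ keysOf ts then keysOf ts else keysOf ts ++ [x.1] := by
        unfold keysOf; rw [List.foldl_append]; rfl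
      have hgA_ne : ∀ s, s ≠ x.1 → gA (ts ++ [x]) s = gA ts s := by
        intro s hs
        unfold gA occsOf
        rw [List.filter_append]
        have : [x].filter (fun y => y.1 == s) = [] := by
          simp [beq_iff_eq]; exact fun h => hs h.symm
        rw [this, List.append_nil]
      have hgA_eq : gA (ts ++ [x]) x.1
          = ((((ts.filter (fun y => y.1 == x.1)).length : Int) + 1),
              innerStep (innerFold (occsOf ts x.1)) (x.2.1, x.2.2)) := by
        unfold gA occsOf
        rw [List.filter_append]
        have : [x].filter (fun y => y.1 == x.1) = [x] := by simp
        rw [this, List.length_append, List.map_append, List.map_singleton]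
        unfold innerFold
        rw [List.foldl_append, List.foldl_cons, List.foldl_nil]
        rfl
      by_cases hm : x.1 ∈ keysOf ts
      · have hget : (PySem.Dict.mk ((keysOf ts).map (fun t => (t, gA ts t)))).get? x.1
            = some (gA ts x.1) := by rw [get?_mk_map, if_pos hm]
        show aInner x.2.1 _ (x.2.2, x.1) = _
        unfold aInner
        simp only [hget]
        rw [hkeys, if_pos hm]
        rw [insert_mk_map_mem _ _ _ _ hm]
        congr 1
        apply List.map_congr_left
        intro s _
        by_cases hs : s = x.1
        · subst hs
          rw [if_pos rfl, hgA_eq]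
          rfl
        · rw [if_neg hs, hgA_ne s hs]
      · have hget : (PySem.Dict.mk ((keysOf ts).map (fun t => (t, gA ts t)))).get? x.1
            = none := by rw [get?_mk_map, if_neg hm]
        show aInner x.2.1 _ (x.2.2, x.1) = _
        unfold aInner
        simp only [hget]
        rw [hkeys, if_neg hm, insert_mk_map_not_mem _ _ _ _ hm]
        apply PySem.Dict.ext
        show _ ++ _ = List.map _ (keysOf ts ++ [x.1])
        rw [List.map_append, List.map_singleton]
        congr 1
        · apply List.map_congr_left
          intro s hs
          rw [hgA_ne s (fun he => hm (he ▸ hs))]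
        · have hnil : ts.filter (fun y => y.1 == x.1) = [] :=
            filter_key_nil ts x.1 (fun h => hm ((mem_keysOf ts x.1).mpr h))
          rw [hgA_eq, hnil]
          simp only [List.length_nil, Nat.cast_zero, zero_add]
          have hocc : occsOf ts x.1 = [] := by unfold occsOf; rw [hnil]; rfl
          rw [hocc]
          rfl

theorem mainB (full ts : List (String × Int × Int)) :
    ts.foldl
      (fun (res : PySem.Dict String (Int × List (Int × List Int))) tk =>
        if res.contains tk.1 then res else res.insert tk.1 (bValue full tk.1))
      PySem.Dict.empty
      = PySem.Dict.mk ((keysOf ts).map (fun t => (t, bValue full t))) := by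
  induction ts using List.reverseRecOn with
  | nil => rfl
  | append_singleton ts x ih =>
      rw [List.foldl_append, List.foldl_cons, List.foldl_nil, ih]
      have hkeys : keysOf (ts ++ [x])
          = if x.1 ∈ keysOf ts then keysOf ts else keysOf ts ++ [x.1] := by
        unfold keysOf; rw [List.foldl_append]; rfl
      by_cases hm : x.1 ∈ keysOf ts
      · rw [contains_mk_map]
        simp only [hm, decide_true, if_true]
        rw [hkeys, if_pos hm]
      · rw [contains_mk_map]
        simp only [hm, decide_false]
        rw [hkeys, if_neg hm, insert_mk_map_not_mem _ _ _ _ hm]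
        apply PySem.Dict.ext
        show _ ++ _ = List.map _ (keysOf ts ++ [x.1])
        rw [List.map_append, List.map_singleton]

-- a block of tokens with a constant doc number is trivially pairwise-≤ on doc
theorem pairwise_of_const {α : Type} (l : List α) (f : α → Int) (n : Int)
    (h : ∀ x ∈ l, f x = n) : l.Pairwise (fun a b => f a ≤ f b) := by
  induction l with
  | nil => exact List.Pairwise.nil
  | cons a l ih =>
      refine List.Pairwise.cons ?_ (ih (fun x hx => h x (List.mem_cons_of_mem a hx)))
      intro b hb
      rw [h a (List.mem_cons_self), h b (List.mem_cons_of_mem a hb)]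

theorem tokensFrom_facts (docs : List (List String)) (n : Int) :
    (∀ x ∈ bTokensFrom docs n, n ≤ x.2.1)
    ∧ (bTokensFrom docs n).Pairwise (fun a b => a.2.1 ≤ b.2.1) := by
  induction docs generalizing n with
  | nil => simp [bTokensFrom]
  | cons d ds ih =>
      have hstep : bTokensFrom (d :: ds) n
          = (PySem.List.enumerate d 0).map (fun q => (q.2, n, q.1)) ++ bTokensFrom ds (n + 1) := by
        unfold bTokensFrom; rw [PySem.List.enumerate_cons, List.flatMap_cons]
      obtain ⟨ihb, ihp⟩ := ih (n + 1)
      have hblock : ∀ x ∈ (PySem.List.enumerate d 0).map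
          (fun (q : Int × String) => (q.2, n, q.1)), x.2.1 = n := by
        intro x hx
        obtain ⟨q, _, hq⟩ := List.mem_map.mp hx
        rw [← hq]
      constructor
      · intro x hx
        rw [hstep, List.mem_append] at hx
        rcases hx with h | h
        · rw [hblock x h]
        · exact le_trans (by omega) (ihb x h)
      · rw [hstep, List.pairwise_append]
        refine ⟨pairwise_of_const _ _ n hblock, ihp, ?_⟩
        intro a ha b hb
        rw [hblock a ha]
        exact le_trans (by omega) (ihb b hb)

-- run-length grouping over a doc-nondecreasing occurrence list = A's inner dict
theorem inner_items (occs : List (Int × Int))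
    (h : occs.Pairwise (fun a b => a.1 ≤ b.1)) :
    (innerFold occs).items = (occs.foldl bRunStep []).reverse
    ∧ ((innerFold occs).items.map (·.1)).Pairwise (· < ·)
    ∧ (∀ k ∈ (innerFold occs).items.map (·.1), k ∈ occs.map (·.1)) := by
  induction occs using List.reverseRecOn with
  | nil =>
      have h0 : (innerFold ([] : List (Int × Int))).items = [] := rfl
      exact ⟨rfl, by rw [h0]; simp, by rw [h0]; simp⟩
  | append_singleton occs z ihf =>
      obtain ⟨hpw, _, hle'⟩ := List.pairwise_append.mp h
      have hle : ∀ y ∈ occs, y.1 ≤ z.1 := by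
        intro y hy; exact hle' y hy z (List.mem_singleton_self z)
      obtain ⟨hitems, hsorted, hsub⟩ := ihf hpw
      have hIF : innerFold (occs ++ [z]) = innerStep (innerFold occs) z := by
        unfold innerFold; rw [List.foldl_append, List.foldl_cons, List.foldl_nil]
      have hRS : (occs ++ [z]).foldl bRunStep [] = bRunStep (occs.foldl bRunStep []) z := by
        rw [List.foldl_append, List.foldl_cons, List.foldl_nil]
      have hnodup : ((innerFold occs).items.map (·.1)).Nodup :=
        hsorted.imp (fun hlt => ne_of_lt hlt)
      have heta : PySem.Dict.mk (innerFold occs).items = innerFold occs := rfl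
      cases hacc : occs.foldl bRunStep [] with
      | nil =>
          have hit : (innerFold occs).items = [] := by rw [hitems, hacc]; rfl
          have hget : (innerFold occs).get? z.1 = none := by
            rw [← heta, hit]; rfl
          rw [hIF, hRS, hacc]
          unfold innerStep
          rw [hget]
          refine ⟨?_, ?_, ?_⟩
          · rw [PySem.Dict.items_insert_of_not_contains _ _
              (by rw [PySem.Dict.contains_eq_decide_mem_keys]
                  simp [PySem.Dict.keys, hit]), hit]
            rfl
          · rw [PySem.Dict.items_insert_of_not_contains _ _
              (by rw [PySem.Dict.contains_eq_decide_mem_keys]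
                  simp [PySem.Dict.keys, hit]), hit]
            simp
          · rw [PySem.Dict.items_insert_of_not_contains _ _
              (by rw [PySem.Dict.contains_eq_decide_mem_keys]
                  simp [PySem.Dict.keys, hit]), hit]
            simp
      | cons hd rest =>
          obtain ⟨d0, ps⟩ := hd
          have hit : (innerFold occs).items = rest.reverse ++ [(d0, ps)] := by
            rw [hitems, hacc, List.reverse_cons]
          have hkeys_lt : ∀ k ∈ rest.reverse.map (·.1), k < d0 := by
            have := hsorted
            rw [hit, List.map_append] at this
            intro k hk
            exact (List.pairwise_append.mp this).2.2 k hk d0 (by simp)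
          by_cases hd0 : d0 = z.1
          · -- same doc: extend the last run / the last-key entry
            subst hd0
            have hget : (innerFold occs).get? z.1 = some ps := by
              have hmem : (z.1, ps) ∈ (innerFold occs).items := by rw [hit]; simp
              have hknd : (innerFold occs).keys.Nodup := by
                simpa [PySem.Dict.keys] using hnodup
              exact PySem.Dict.get?_of_mem_items _ hmem hknd
            rw [hIF, hRS, hacc]
            unfold innerStep bRunStep
            rw [hget]
            simp only [BEq.rfl, if_true]
            have hcont : (innerFold occs).contains z.1 = true := by
              rw [PySem.Dict.contains_eq_isSome_get?, hget]; rfl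
            have hitems' : ((innerFold occs).insert z.1 (ps ++ [z.2])).items
                = rest.reverse ++ [(z.1, ps ++ [z.2])] := by
              rw [PySem.Dict.items_insert_of_contains _ _ hcont, hit, List.map_append]
              congr 1
              · have hpt : ∀ q ∈ rest.reverse,
                    (fun (p : Int × List Int) =>
                      if (p.1 == z.1) = true then (z.1, ps ++ [z.2]) else p) q = id q := by
                  intro q hq
                  have hlt : q.1 < z.1 := hkeys_lt q.1 (List.mem_map_of_mem hq)
                  have hne : (q.1 == z.1) = false := by
                    rw [beq_eq_false_iff_ne]; omega
                  simp [hne]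
                rw [List.map_congr_left hpt, List.map_id]
              · simp
            refine ⟨?_, ?_, ?_⟩
            · rw [hitems', List.reverse_cons]
            · rw [hitems']
              have hs := hsorted
              rw [hit] at hs
              simpa using hs
            · intro k hk
              rw [hitems'] at hk
              have hk' : k ∈ (innerFold occs).items.map (·.1) := by
                rw [hit]
                simpa using hk
              rw [List.map_append]
              exact List.mem_append_left _ (hsub k hk')
          · -- new doc: z.1 is strictly larger than every key
            have hsub_le : ∀ k ∈ (innerFold occs).items.map (·.1), k ≤ z.1 := by
              intro k hk
              obtain ⟨y, hy, hyk⟩ := List.mem_map.mp (hsub k hk)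
              exact hyk ▸ hle y hy
            have hnotmem : z.1 ∉ (innerFold occs).items.map (·.1) := by
              intro hmem
              have h1 : z.1 ≤ d0 := by
                rw [hit, List.map_append] at hmem
                rcases List.mem_append.mp hmem with h' | h'
                · exact le_of_lt (hkeys_lt _ h')
                · simp at h'; omega
              have h2 : d0 ≤ z.1 := hsub_le d0 (by rw [hit]; simp)
              exact hd0 (by omega)
            have hget : (innerFold occs).get? z.1 = none := by
              rw [PySem.Dict.get?_eq_none_iff_not_mem_keys]
              simpa [PySem.Dict.keys] using hnotmem
            have hcont : (innerFold occs).contains z.1 = false := by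
              rw [PySem.Dict.contains_eq_isSome_get?, hget]; rfl
            rw [hIF, hRS, hacc]
            unfold innerStep bRunStep
            rw [hget]
            have hbne : (d0 == z.1) = false := by rw [beq_eq_false_iff_ne]; exact hd0
            simp only [hbne]
            have hitems' : ((innerFold occs).insert z.1 [z.2]).items
                = (innerFold occs).items ++ [(z.1, [z.2])] :=
              PySem.Dict.items_insert_of_not_contains _ _ hcont
            refine ⟨?_, ?_, ?_⟩
            · rw [hitems', hit]
              simp
            · rw [hitems', List.map_append, List.pairwise_append]
              refine ⟨hsorted, by simp, ?_⟩
              intro a ha b hb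
              simp at hb
              have h1 : a ≤ z.1 := hsub_le a ha
              have h2 : a ≠ z.1 := fun he => hnotmem (he ▸ ha)
              omega
            · intro k hk
              rw [hitems', List.map_append] at hk
              rw [List.map_append]
              rcases List.mem_append.mp hk with h' | h'
              · exact List.mem_append_left _ (hsub k h')
              · simp at h'
                subst h'
                simp

theorem value_eq (ts : List (String × Int × Int))
    (hpw : ts.Pairwise (fun a b => a.2.1 ≤ b.2.1)) (t : String) :
    (t, bValue ts t) = (t, (gA ts t).1, (gA ts t).2.items) := by
  have hocc : (occsOf ts t).Pairwise (fun a b => a.1 ≤ b.1) := by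
    unfold occsOf
    exact List.pairwise_map.mpr (List.Pairwise.sublist List.filter_sublist hpw)
  obtain ⟨hitems, hsorted, _⟩ := inner_items (occsOf ts t) hocc
  have hruns : ((occsOf ts t).foldl bRunStep []).reverse = (innerFold (occsOf ts t)).items :=
    hitems.symm
  have hnodup : ((((occsOf ts t).foldl bRunStep []).reverse).map (·.1)).Nodup := by
    rw [hruns]; exact hsorted.imp (fun hlt => ne_of_lt hlt)
  unfold bValue gA occsOf
  simp only [Prod.mk.injEq, true_and]
  constructor
  · rw [List.length_map]
  · show ((((occsOf ts t).foldl bRunStep []).reverse).foldl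
        (fun (d : PySem.Dict Int (List Int)) pr => d.insert pr.1 pr.2) PySem.Dict.empty).items
      = (innerFold (occsOf ts t)).items
    rw [PySem.Dict.items_foldl_insert_fresh (((occsOf ts t).foldl bRunStep []).reverse)
      (fun (a : Int × List Int) => a.1) (fun (a : Int × List Int) => a.2) PySem.Dict.empty
      (fun a _ => PySem.Dict.contains_empty _) hnodup]
    simpa using hruns

-- ===== VERDICT (by name: the statement is the Claim_ definition above) =====
theorem build_positional_index_spec : Claim_equal_build_positional_index := by
  unfold Claim_equal_build_positional_index Spec_build_positional_index
  intro documents _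
  show build_positional_index documents = build_positional_index_alt documents
  unfold build_positional_index build_positional_index_alt
  dsimp only
  have htok : bTokens documents = bTokensFrom documents 1 := rfl
  rw [A_fold_flat documents 1 PySem.Dict.empty]
  rw [htok, mainA, mainB]
  show (((keysOf (bTokensFrom documents 1)).map (fun t => (t, gA (bTokensFrom documents 1) t))).map
      (fun p => (p.1, p.2.1, p.2.2.items))) = _
  rw [List.map_map]
  apply List.map_congr_left
  intro t _
  exact (value_eq (bTokensFrom documents 1) (tokensFrom_facts documents 1).2 t).symm
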